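-- pv_equiv track=rewrite | github.com/Favo02/leetcode | solved/930.BinarySubarraysWithSum.py | compact_zeros
-- ===== SOURCE A (Python) =====
-- def compact_zeros(nums):
--   def first_n_integers(qty):
--     return (qty * (qty+1)) // 2
--
--   res = []
--   zeros = 0
--   zero_goal = 0
--   for n in nums:
--     if n == 1:
--       if zeros > 0:
--         res.append((0, zeros))
--         zero_goal += first_n_integers(zeros)
--         zeros = 0
--       res.append((1, 1))
--     else:
--       zeros += 1
--
--   if zeros > 0:
--     res.append((0, zeros))
--     zero_goal += first_n_integers(zeros)
--   return res, zero_goal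
-- ===== SOURCE B (Python) =====
-- def compact_zeros(nums):
--   res = []
--   zero_goal = 0
--   i = 0
--   n = len(nums)
--   while i < n:
--     j = i
--     if nums[i] == 1:
--       while j < n and nums[j] == 1:
--         j += 1
--       res.extend([(1, 1)] * (j - i))
--     else:
--       while j < n and nums[j] != 1:
--         j += 1
--       L = j - i
--       res.append((0, L))
--       zero_goal += L * (L + 1) // 2
--     i = j
--   return res, zero_goal
-- ===== Notes on version B (the rewrite author's own statement) =====
-- stated objective: alternative
-- what changed: B walks maximal runs with a two-index scan: each one-run contributes that many unit pairs to the result at once and each zero-run of length L contributes one compacted pair plus its triangular count, instead of A's element-by-element loop with a zeros counter flushed on each one and again after the loop.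
import Mathlib
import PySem

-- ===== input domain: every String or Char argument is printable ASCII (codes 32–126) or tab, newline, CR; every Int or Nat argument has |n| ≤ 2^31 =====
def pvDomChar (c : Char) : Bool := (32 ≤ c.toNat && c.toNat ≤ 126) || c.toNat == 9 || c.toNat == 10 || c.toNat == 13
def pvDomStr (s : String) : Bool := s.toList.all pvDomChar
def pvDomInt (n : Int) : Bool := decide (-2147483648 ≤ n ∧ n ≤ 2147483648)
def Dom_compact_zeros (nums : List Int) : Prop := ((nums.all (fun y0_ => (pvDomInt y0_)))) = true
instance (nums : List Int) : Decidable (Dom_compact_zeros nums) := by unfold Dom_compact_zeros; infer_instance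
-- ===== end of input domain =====

-- B is a run-at-a-time rewrite of A (same O(n) cost); equivalence of the two is proved for all inputs.

-- ===== PORT A =====
-- A's element loop over nums with state (res, zeros, zero_goal); the trailing
-- 'if zeros > 0' flush is the [] case.
def pvTri (qty : Int) : Int := PySem.Int.floordiv (qty * (qty + 1)) 2

def pvLoopA (res : List (Int × Int)) (zeros : Int) (zero_goal : Int) :
    List Int → (List (Int × Int)) × Int
  | [] => if zeros > 0 then (res ++ [(0, zeros)], zero_goal + pvTri zeros) else (res, zero_goal)
  | n :: rest =>
    if n == 1 then
      if zeros > 0 then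
        pvLoopA (res ++ [(0, zeros), (1, 1)]) 0 (zero_goal + pvTri zeros) rest
      else
        pvLoopA (res ++ [(1, 1)]) zeros zero_goal rest
    else
      pvLoopA res (zeros + 1) zero_goal rest

def compact_zeros (nums : List Int) : (List (Int × Int)) × Int :=
  pvLoopA [] 0 0 nums

-- ===== PORT B =====
-- B's outer while loop: each step consumes one maximal run (the inner 'while j < n'
-- scans are takeWhile/dropWhile on the remaining suffix).
def pvGoB (l : List Int) : (List (Int × Int)) × Int :=
  match l with
  | [] => ([], 0)
  | x :: xs =>
    if x == 1 then
      let run := (x :: xs).takeWhile (fun y => y == 1)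
      let rest := (x :: xs).dropWhile (fun y => y == 1)
      let p := pvGoB rest
      (List.replicate run.length (1, 1) ++ p.1, p.2)
    else
      let run := (x :: xs).takeWhile (fun y => y != 1)
      let rest := (x :: xs).dropWhile (fun y => y != 1)
      let p := pvGoB rest
      ((0, (run.length : Int)) :: p.1, p.2 + pvTri (run.length : Int))
termination_by l.length
decreasing_by
  · simp only [List.dropWhile_cons, *]
    simp_all
    exact List.length_dropWhile_le _ _
  · simp only [List.dropWhile_cons, *]
    simp_all
    exact List.length_dropWhile_le _ _

def compact_zeros_alt (nums : List Int) : (List (Int × Int)) × Int :=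
  pvGoB nums

-- ===== PRECONDITION & SPEC =====
def Spec_compact_zeros (nums : List Int) (out : (List (Int × Int)) × Int) : Prop := out = compact_zeros_alt nums
instance (nums : List Int) (out : (List (Int × Int)) × Int) : Decidable (Spec_compact_zeros nums out) := by unfold Spec_compact_zeros; infer_instance

-- ===== CLAIM (what is proved, stated in full; the proofs are below) =====
def Claim_equal_compact_zeros : Prop := ∀ (nums : List Int), Dom_compact_zeros nums → Spec_compact_zeros nums (compact_zeros nums)

-- ===== LEMMAS AND PROOFS =====

-- takeWhile/dropWhile over a block of zeros (all satisfy `y != 1`).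
lemma tw_replicate_append (z : Nat) (ns : List Int) :
    (List.replicate z (0 : Int) ++ ns).takeWhile (fun y => y != 1) =
      List.replicate z (0 : Int) ++ ns.takeWhile (fun y => y != 1) := by
  induction z with
  | zero => simp
  | succ z ih => simp [List.replicate_succ, ih]

lemma dw_replicate_append (z : Nat) (ns : List Int) :
    (List.replicate z (0 : Int) ++ ns).dropWhile (fun y => y != 1) =
      ns.dropWhile (fun y => y != 1) := by
  induction z with
  | zero => simp
  | succ z ih => simp [List.replicate_succ, ih]

-- How pvGoB consumes a zero run: z leading zeros, a non-1 element, then the rest.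
lemma goB_block (z : Nat) (n : Int) (hn : n ≠ 1) (ns : List Int) :
    pvGoB (List.replicate z 0 ++ n :: ns) =
      ((0, (z : Int) + 1 + ((ns.takeWhile (fun y => y != 1)).length : Int)) ::
          (pvGoB (ns.dropWhile (fun y => y != 1))).1,
       (pvGoB (ns.dropWhile (fun y => y != 1))).2 +
         pvTri ((z : Int) + 1 + ((ns.takeWhile (fun y => y != 1)).length : Int))) := by
  cases z with
  | zero =>
    rw [List.replicate, List.nil_append, pvGoB]
    simp [hn, List.dropWhile_cons]
    push_cast; ring_nf
    trivial
  | succ z =>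
    rw [List.replicate_succ, List.cons_append, pvGoB]
    simp only [show ((0 : Int) == 1) = false by decide, Bool.false_eq_true, if_false,
      List.takeWhile_cons, List.dropWhile_cons, show ((0 : Int) != 1) = true by decide,
      if_true, tw_replicate_append, dw_replicate_append,
      List.takeWhile_cons_of_pos, List.dropWhile_cons]
    simp [hn, List.dropWhile_cons]
    constructor
    · push_cast; ring_nf
    · push_cast; ring_nf

-- pvGoB on a list starting with a 1 peels exactly one (1,1).
lemma goB_one_cons (ns : List Int) :
    pvGoB (1 :: ns) = ((1, 1) :: (pvGoB ns).1, (pvGoB ns).2) := by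
  cases ns with
  | nil => simp [pvGoB]
  | cons m ms =>
    by_cases hm : m = 1
    · subst hm
      rw [pvGoB]
      conv_rhs => rw [pvGoB]
      simp [List.replicate_succ]
    · rw [pvGoB]
      simp [List.dropWhile_cons, hm, List.replicate_succ]

-- pvGoB sees `replicate z 0 ++ n :: ns` (n ≠ 1) exactly like one more leading zero.
lemma goB_zero_shift (z : Nat) (n : Int) (ns : List Int) (hn : n ≠ 1) :
    pvGoB (List.replicate z 0 ++ n :: ns) = pvGoB (List.replicate (z + 1) 0 ++ ns) := by
  have h2 : List.replicate (z + 1) (0 : Int) ++ ns = List.replicate z 0 ++ (0 : Int) :: ns := by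
    rw [List.replicate_succ', List.append_assoc]; rfl
  rw [goB_block z n hn ns, h2, goB_block z 0 (by decide) ns]

-- pvGoB on a pure zero block followed by a 1-headed (or empty) tail.
lemma goB_zeros_flush (z : Nat) (hz : 0 < z) (ns : List Int)
    (h : ns = [] ∨ ∃ ms, ns = 1 :: ms) :
    pvGoB (List.replicate z 0 ++ ns) =
      ((0, (z : Int)) :: (pvGoB ns).1, (pvGoB ns).2 + pvTri (z : Int)) := by
  obtain ⟨z, rfl⟩ : ∃ z', z = z' + 1 := ⟨z - 1, (Nat.succ_pred_eq_of_pos hz).symm⟩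
  have h2 : List.replicate (z + 1) (0 : Int) ++ ns = List.replicate z 0 ++ (0 : Int) :: ns := by
    rw [List.replicate_succ', List.append_assoc]; rfl
  rw [h2, goB_block z 0 (by decide) ns]
  rcases h with rfl | ⟨ms, rfl⟩
  · simp
  · simp [List.dropWhile_cons]

lemma loopA_eq (nums : List Int) : ∀ (res : List (Int × Int)) (z : Nat) (g : Int),
    pvLoopA res (z : Int) g nums =
      (res ++ (pvGoB (List.replicate z 0 ++ nums)).1,
       g + (pvGoB (List.replicate z 0 ++ nums)).2) := by
  induction nums with
  | nil =>
    intro res z g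
    rw [pvLoopA]
    by_cases hz : 0 < z
    · rw [if_pos (by exact_mod_cast hz)]
      rw [show (List.replicate z (0:Int) ++ [] : List Int) = List.replicate z 0 by simp,
        show (List.replicate z (0:Int)) = List.replicate z 0 ++ ([] : List Int) by simp,
        goB_zeros_flush z hz [] (Or.inl rfl)]
      simp [pvGoB]
    · have : z = 0 := by omega
      subst this
      simp [pvGoB]
  | cons n ns ih =>
    intro res z g
    by_cases hn : n = 1
    · subst hn
      by_cases hz : 0 < z
      · rw [pvLoopA, if_pos (show ((1:Int) == 1) = true by decide), if_pos (by exact_mod_cast hz)]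
        have := ih (res ++ [(0, (z : Int)), (1, 1)]) 0 (g + pvTri (z : Int))
        simp only [Nat.cast_zero] at this
        rw [this, goB_zeros_flush z hz (1 :: ns) (Or.inr ⟨ns, rfl⟩), goB_one_cons]
        simp
        ring
      · have : z = 0 := by omega
        subst this
        rw [pvLoopA]
        simp only [Nat.cast_zero, beq_self_eq_true, if_true, lt_irrefl]
        have := ih (res ++ [(1, 1)]) 0 g
        simp only [Nat.cast_zero] at this
        rw [this, show (List.replicate 0 (0:Int) ++ 1 :: ns : List Int) = 1 :: ns by simp,
          show (List.replicate 0 (0:Int) ++ ns : List Int) = ns by simp, goB_one_cons]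
        simp
    · rw [pvLoopA, if_neg (by simpa using hn)]
      have h1 : (z : Int) + 1 = ((z + 1 : Nat) : Int) := by push_cast; ring
      rw [h1, ih res (z + 1) g, goB_zero_shift z n ns hn]

-- ===== VERDICT (by name: the statement is the Claim_ definition above) =====
theorem compact_zeros_spec : Claim_equal_compact_zeros := by
  intro nums _
  show compact_zeros nums = compact_zeros_alt nums
  have h := loopA_eq nums [] 0 0
  simpa [compact_zeros, compact_zeros_alt] using h
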